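-- pv_equiv track=rewrite | github.com/dheeraj-khanna/Zero-to-Hero-bootcamp | Code/FunPracticEx.py | summer_69
-- ===== SOURCE A (Python) =====
-- def summer_69(arr):
--     """
--     SUMMER OF '69: Return the sum of the numbers in the array, except ignore sections of numbers starting
--     with a 6 and extending to the next 9 (every 6 will be followed by at least one 9).
--     Return 0 for no numbers.
--
--     summer_69([1, 3, 5]) --> 9
--     summer_69([4, 5, 6, 7, 8, 9]) --> 9
--     summer_69([2, 1, 6, 9, 11]) --> 14
--
--     :param arr:
--
--     :return: 0 or no number
--
--     """
--     total = 0
--     skip = False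
--     for num in arr:
--         if num != 6 and skip is False:
--             total = total + num
--         elif num == 6:
--             skip = True
--             continue
--         elif num == 9:
--             skip = False
--             continue
--
--     return total
-- ===== SOURCE B (Python) =====
-- def summer_69(arr):
--     total = 0
--     it = iter(arr)
--     for num in it:
--         if num == 6:
--             for x in it:
--                 if x == 9:
--                     break
--         else:
--             total += num
--     return total
-- ===== Notes on version B (the rewrite author's own statement) =====
-- stated objective: alternative
-- what changed: Replaces the boolean skip flag with a nested drain loop over a shared iterator: on seeing 6 an inner loop consumes elements until the next 9, so no per-element state is carried.
import Mathlib
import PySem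

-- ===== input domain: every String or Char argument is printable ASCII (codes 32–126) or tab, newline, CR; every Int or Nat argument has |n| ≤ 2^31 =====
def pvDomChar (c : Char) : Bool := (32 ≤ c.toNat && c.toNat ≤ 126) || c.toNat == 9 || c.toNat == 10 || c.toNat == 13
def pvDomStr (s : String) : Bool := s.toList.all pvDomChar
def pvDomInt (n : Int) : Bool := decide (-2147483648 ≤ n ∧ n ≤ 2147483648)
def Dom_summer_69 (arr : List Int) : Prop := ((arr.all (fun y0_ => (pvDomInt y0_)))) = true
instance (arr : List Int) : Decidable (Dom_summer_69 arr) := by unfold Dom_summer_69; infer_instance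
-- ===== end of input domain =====

-- B replaces A's boolean skip flag with a nested drain loop over the shared element stream (alternative decomposition, same cost).

-- ===== PORT A =====
-- A: fold over arr carrying (total, skip); branches kept in A's order.
def summer_69 (arr : List Int) : Int :=
  (arr.foldl (fun (s : Int × Bool) num =>
      if num ≠ 6 ∧ s.2 = false then (s.1 + num, s.2)
      else if num = 6 then (s.1, true)
      else if num = 9 then (s.1, false)
      else s) ((0 : Int), false)).1

-- ===== PORT B =====
-- B's inner for-loop over the shared iterator: drop elements until (and including) the first 9.
def pvDrain69 : List Int → List Int
  | [] => []
  | x :: xs => if x = 9 then xs else pvDrain69 xs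

theorem pvDrain69_len (xs : List Int) : (pvDrain69 xs).length ≤ xs.length := by
  induction xs with
  | nil => simp [pvDrain69]
  | cons x xs ih => simp [pvDrain69]; split <;> omega

def summer_69_alt : List Int → Int
  | [] => 0
  | x :: xs =>
      if x = 6 then summer_69_alt (pvDrain69 xs)
      else x + summer_69_alt xs
termination_by l => l.length
decreasing_by
  · have := pvDrain69_len xs; simp; omega
  · simp

-- ===== PRECONDITION & SPEC =====
def Spec_summer_69 (arr : List Int) (out : Int) : Prop := out = summer_69_alt arr
instance (arr : List Int) (out : Int) : Decidable (Spec_summer_69 arr out) := by unfold Spec_summer_69; infer_instance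

-- ===== CLAIM (what is proved, stated in full; the proofs are below) =====
def Claim_equal_summer_69 : Prop := ∀ (arr : List Int), Dom_summer_69 arr → Spec_summer_69 arr (summer_69 arr)

-- ===== LEMMAS AND PROOFS =====
theorem summer_69_alt_cons (x : Int) (xs : List Int) :
    summer_69_alt (x :: xs) =
      if x = 6 then summer_69_alt (pvDrain69 xs) else x + summer_69_alt xs := by
  rw [summer_69_alt]

theorem summer_69_loop (l : List Int) :
    (∀ t : Int, (l.foldl (fun (s : Int × Bool) num =>
        if num ≠ 6 ∧ s.2 = false then (s.1 + num, s.2)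
        else if num = 6 then (s.1, true)
        else if num = 9 then (s.1, false)
        else s) (t, false)).1 = t + summer_69_alt l) ∧
    (∀ t : Int, (l.foldl (fun (s : Int × Bool) num =>
        if num ≠ 6 ∧ s.2 = false then (s.1 + num, s.2)
        else if num = 6 then (s.1, true)
        else if num = 9 then (s.1, false)
        else s) (t, true)).1 = t + summer_69_alt (pvDrain69 l)) := by
  induction l with
  | nil => simp [summer_69_alt, pvDrain69]
  | cons x xs ih =>
    constructor
    · intro t
      by_cases h6 : x = 6
      · subst h6
        simpa [summer_69_alt_cons] using ih.2 t
      · simp only [List.foldl_cons]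
        rw [if_pos ⟨h6, trivial⟩, ih.1 (t + x), summer_69_alt_cons, if_neg h6]
        ring
    · intro t
      by_cases h6 : x = 6
      · subst h6
        simpa [pvDrain69] using ih.2 t
      · by_cases h9 : x = 9
        · subst h9
          simp only [List.foldl_cons]
          rw [if_neg (by simp), if_neg (by norm_num), if_pos trivial, ih.1 t]
          simp [pvDrain69]
        · simp only [List.foldl_cons]
          rw [if_neg (by simp [h6]), if_neg h6, if_neg h9, ih.2 t]
          simp [pvDrain69, h9]

-- ===== VERDICT (by name: the statement is the Claim_ definition above) =====
theorem summer_69_spec : Claim_equal_summer_69 := by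
  intro arr _
  show summer_69 arr = summer_69_alt arr
  unfold summer_69
  simpa using (summer_69_loop arr).1 0
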